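-- pv_equiv track=rewrite | github.com/binhrobles/thirteen | packages/training/analyze_combo_breaks.py | get_max_run_length_for_rank
-- ===== SOURCE A (Python) =====
-- def get_max_run_length_for_rank(hand_ranks, rank):
--     """Return the longest run containing `rank` that's possible from this hand."""
--     eligible = sorted(set(r for r in hand_ranks if r < 12))
--     if rank not in eligible:
--         return 0
--     # Find the run segment containing rank
--     # Walk left and right
--     left = rank
--     while left - 1 in eligible:
--         left -= 1
--     right = rank
--     while right + 1 in eligible:
--         right += 1
--     return right - left + 1
-- ===== SOURCE B (Python) =====
-- def get_max_run_length_for_rank(hand_ranks, rank):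
--     """One forward pass over the sorted distinct eligible ranks, grouping
--     maximal consecutive runs and reporting the one containing rank."""
--     eligible = sorted({r for r in hand_ranks if r < 12})
--     if not eligible:
--         return 0
--     start = prev = eligible[0]
--     for v in eligible[1:]:
--         if v == prev + 1:
--             prev = v
--         else:
--             if start <= rank <= prev:
--                 return prev - start + 1
--             start = prev = v
--     return prev - start + 1 if start <= rank <= prev else 0
-- ===== Notes on version B (the rewrite author's own statement) =====
-- stated objective: alternative
-- what changed: Replaces A's membership test plus outward left/right expansion with repeated 'in' scans by a single forward grouping pass over the sorted distinct eligible ranks that builds maximal consecutive runs and returns the length of the run containing rank.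
import Mathlib
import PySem

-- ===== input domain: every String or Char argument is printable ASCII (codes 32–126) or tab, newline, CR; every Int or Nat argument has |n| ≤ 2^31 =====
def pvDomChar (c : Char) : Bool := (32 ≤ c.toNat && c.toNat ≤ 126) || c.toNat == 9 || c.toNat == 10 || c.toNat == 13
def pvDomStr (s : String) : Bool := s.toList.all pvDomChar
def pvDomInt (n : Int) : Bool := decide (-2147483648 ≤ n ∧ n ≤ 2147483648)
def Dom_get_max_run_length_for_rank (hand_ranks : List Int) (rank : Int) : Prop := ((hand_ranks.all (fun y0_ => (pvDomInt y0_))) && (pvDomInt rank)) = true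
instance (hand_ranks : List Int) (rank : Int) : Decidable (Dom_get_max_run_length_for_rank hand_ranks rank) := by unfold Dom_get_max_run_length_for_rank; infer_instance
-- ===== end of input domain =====

-- B groups the sorted distinct eligible ranks into maximal consecutive runs in one
-- forward pass instead of A's membership test plus outward left/right expansion (alternative decomposition).

-- ===== PORT A =====
-- `while left - 1 in eligible: left -= 1`; fuel = eligible.length makes it total
-- (each step consumes a distinct member of eligible, so this fuel is never exhausted).
def pvWalkL (e : List Int) : Int → Nat → Int
  | l, 0 => l
  | l, f+1 => if (l - 1) ∈ e then pvWalkL e (l - 1) f else l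

-- `while right + 1 in eligible: right += 1`, same fuel guard.
def pvWalkR (e : List Int) : Int → Nat → Int
  | r, 0 => r
  | r, f+1 => if (r + 1) ∈ e then pvWalkR e (r + 1) f else r

def get_max_run_length_for_rank (hand_ranks : List Int) (rank : Int) : Int :=
  let eligible := PySem.List.sorted (PySem.Set.ofList (hand_ranks.filter (fun r => decide (r < 12)))) (fun x => x) false
  if rank ∉ eligible then 0
  else (pvWalkR eligible rank eligible.length) - (pvWalkL eligible rank eligible.length) + 1

-- ===== PORT B =====
-- the for-loop over eligible[1:]: current run is [start..prev]
def pvScan (rank start prev : Int) : List Int → Int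
  | [] => if start ≤ rank ∧ rank ≤ prev then prev - start + 1 else 0
  | v :: rest =>
    if v = prev + 1 then pvScan rank start v rest
    else if start ≤ rank ∧ rank ≤ prev then prev - start + 1
    else pvScan rank v v rest

def get_max_run_length_for_rank_alt (hand_ranks : List Int) (rank : Int) : Int :=
  let eligible := PySem.List.sorted (PySem.Set.ofList (hand_ranks.filter (fun r => decide (r < 12)))) (fun x => x) false
  match eligible with
  | [] => 0
  | v :: rest => pvScan rank v v rest

-- ===== PRECONDITION & SPEC =====
def Spec_get_max_run_length_for_rank (hand_ranks : List Int) (rank : Int) (out : Int) : Prop := out = get_max_run_length_for_rank_alt hand_ranks rank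
instance (hand_ranks : List Int) (rank : Int) (out : Int) : Decidable (Spec_get_max_run_length_for_rank hand_ranks rank out) := by unfold Spec_get_max_run_length_for_rank; infer_instance

-- ===== CLAIM (what is proved, stated in full; the proofs are below) =====
def Claim_equal_get_max_run_length_for_rank : Prop := ∀ (hand_ranks : List Int) (rank : Int), Dom_get_max_run_length_for_rank hand_ranks rank → Spec_get_max_run_length_for_rank hand_ranks rank (get_max_run_length_for_rank hand_ranks rank)

-- ===== LEMMAS AND PROOFS =====

theorem pv_interval_lt_length (e : List Int) (a b : Int) (hab : a ≤ b)
    (h : ∀ x : Int, a ≤ x → x ≤ b → x ∈ e) : (b - a).toNat < e.length := by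
  have hsub : ((List.range ((b - a).toNat + 1)).map (fun i : Nat => a + (i : Int))) ⊆ e := by
    intro x hx
    simp only [List.mem_map] at hx
    obtain ⟨i, hi, rfl⟩ := hx
    rw [List.mem_range] at hi
    have h1 : (0:Int) ≤ (i : Int) := Int.natCast_nonneg i
    have h2 : (i : Int) ≤ b - a := by omega
    exact h _ (by omega) (by omega)
  have hnd : ((List.range ((b - a).toNat + 1)).map (fun i : Nat => a + (i : Int))).Nodup := by
    refine List.nodup_range.map ?_
    intro i j hij
    simp only at hij
    omega
  have := (List.subperm_of_subset hnd hsub).length_le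
  simpa using this


theorem pv_walkL_eq (e : List Int) (start : Int) (h2 : (start - 1) ∉ e) :
    ∀ (fuel : Nat) (l : Int), start ≤ l → (∀ x : Int, start ≤ x → x ≤ l → x ∈ e) →
    (l - start).toNat ≤ fuel → pvWalkL e l fuel = start := by
  intro fuel
  induction fuel with
  | zero =>
    intro l hsl h1 hf
    have : l = start := by omega
    simp [pvWalkL, this]
  | succ f ih =>
    intro l hsl h1 hf
    by_cases hm : (l - 1) ∈ e
    · have hne : l ≠ start := by
        intro hls; rw [hls] at hm; exact h2 hm
      rw [pvWalkL, if_pos hm]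
      exact ih (l - 1) (by omega) (fun x hx1 hx2 => h1 x hx1 (by omega)) (by omega)
    · have : l = start := by
        by_contra hne
        exact hm (h1 (l - 1) (by omega) (by omega))
      rw [pvWalkL, if_neg hm, this]

theorem pv_walkR_eq (e : List Int) (stop : Int) (h2 : (stop + 1) ∉ e) :
    ∀ (fuel : Nat) (r : Int), r ≤ stop → (∀ x : Int, r ≤ x → x ≤ stop → x ∈ e) →
    (stop - r).toNat ≤ fuel → pvWalkR e r fuel = stop := by
  intro fuel
  induction fuel with
  | zero =>
    intro r hrs h1 hf
    have : r = stop := by omega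
    simp [pvWalkR, this]
  | succ f ih =>
    intro r hrs h1 hf
    by_cases hm : (r + 1) ∈ e
    · have hne : r ≠ stop := by
        intro hls; rw [hls] at hm; exact h2 hm
      rw [pvWalkR, if_pos hm]
      exact ih (r + 1) (by omega) (fun x hx1 hx2 => h1 x (by omega) hx2) (by omega)
    · have : r = stop := by
        by_contra hne
        exact hm (h1 (r + 1) (by omega) (by omega))
      rw [pvWalkR, if_neg hm, this]


-- when the current run [start..prev] is maximal and contains rank, A's walks give exactly it
theorem pv_run_val (e : List Int) (start prev rank : Int)
    (h1 : ∀ x : Int, start ≤ x → x ≤ prev → x ∈ e)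
    (h2 : (start - 1) ∉ e) (h3 : (prev + 1) ∉ e)
    (hr1 : start ≤ rank) (hr2 : rank ≤ prev) :
    (if rank ∉ e then 0 else pvWalkR e rank e.length - pvWalkL e rank e.length + 1)
      = prev - start + 1 := by
  have hmem : rank ∈ e := h1 rank hr1 hr2
  rw [if_neg (by simpa using hmem)]
  have hL : pvWalkL e rank e.length = start :=
    pv_walkL_eq e start h2 e.length rank hr1
      (fun x hx1 hx2 => h1 x hx1 (by omega))
      (le_of_lt (pv_interval_lt_length e start rank hr1
        (fun x hx1 hx2 => h1 x hx1 (by omega))))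
  have hR : pvWalkR e rank e.length = prev :=
    pv_walkR_eq e prev h3 e.length rank hr2
      (fun x hx1 hx2 => h1 x (by omega) hx2)
      (le_of_lt (pv_interval_lt_length e rank prev hr2
        (fun x hx1 hx2 => h1 x (by omega) hx2)))
  rw [hL, hR]

theorem pv_scan_correct (e : List Int) (rank : Int) :
    ∀ (rest : List Int) (start prev : Int),
      start ≤ prev →
      (∀ x : Int, start ≤ x → x ≤ prev → x ∈ e) →
      (start - 1) ∉ e →
      (∀ x ∈ e, prev < x → x ∈ rest) →
      (∀ x ∈ rest, prev < x ∧ x ∈ e) →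
      rest.Pairwise (· < ·) →
      (rank ∈ e → start ≤ rank) →
      pvScan rank start prev rest =
        (if rank ∉ e then 0
         else pvWalkR e rank e.length - pvWalkL e rank e.length + 1) := by
  intro rest
  induction rest with
  | nil =>
    intro start prev hsp h1 h2 h3 h4 h5 hr
    have hp1 : (prev + 1) ∉ e := fun hm => by simpa using h3 _ hm (by omega)
    by_cases hin : start ≤ rank ∧ rank ≤ prev
    · rw [pvScan, if_pos hin]
      exact (pv_run_val e start prev rank h1 h2 hp1 hin.1 hin.2).symm
    · rw [pvScan, if_neg hin]
      have : rank ∉ e := by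
        intro hm
        have hs := hr hm
        have hng : ¬ prev < rank := fun hlt => by simpa using h3 _ hm hlt
        exact hin ⟨hs, by omega⟩
      rw [if_pos this]
  | cons v rest' ih =>
    intro start prev hsp h1 h2 h3 h4 h5 hr
    have hv := h4 v (by simp)
    by_cases hvp : v = prev + 1
    · rw [pvScan, if_pos hvp]
      refine ih start v (by omega) ?_ h2 ?_ ?_ (h5.sublist (List.sublist_cons_self _ _)) hr
      · intro x hx1 hx2
        rcases lt_or_eq_of_le hx2 with hlt | rfl
        · exact h1 x hx1 (by omega)
        · exact hv.2
      · intro x hx hvx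
        have := h3 x hx (by omega)
        simp only [List.mem_cons] at this
        rcases this with rfl | h
        · omega
        · exact h
      · intro x hx
        have hxe := h4 x (List.mem_cons_of_mem _ hx)
        have := List.rel_of_pairwise_cons h5 hx
        exact ⟨by omega, hxe.2⟩
    · have hv2 : prev + 2 ≤ v := by omega
      have hp1 : (prev + 1) ∉ e := by
        intro hm
        have := h3 _ hm (by omega)
        simp only [List.mem_cons] at this
        rcases this with rfl | h
        · omega
        · have := (h4 _ (List.mem_cons_of_mem _ h)).1
          have := List.rel_of_pairwise_cons h5 h
          omega
      rw [pvScan, if_neg hvp]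
      by_cases hin : start ≤ rank ∧ rank ≤ prev
      · rw [if_pos hin]
        exact (pv_run_val e start prev rank h1 h2 hp1 hin.1 hin.2).symm
      · rw [if_neg hin]
        refine ih v v le_rfl ?_ ?_ ?_ ?_ (h5.sublist (List.sublist_cons_self _ _)) ?_
        · intro x hx1 hx2
          have : x = v := by omega
          rw [this]; exact hv.2
        · intro hm
          have := h3 _ hm (by omega)
          simp only [List.mem_cons] at this
          rcases this with h | h
          · omega
          · have := List.rel_of_pairwise_cons h5 h
            omega
        · intro x hx hvx
          have := h3 x hx (by omega)
          simp only [List.mem_cons] at this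
          rcases this with rfl | h
          · omega
          · exact h
        · intro x hx
          have hxe := h4 x (List.mem_cons_of_mem _ hx)
          have := List.rel_of_pairwise_cons h5 hx
          exact ⟨this, hxe.2⟩
        · intro hm
          have hs := hr hm
          have hnp : ¬ rank ≤ prev ∨ ¬ start ≤ rank := by tauto
          have hgt : prev < rank := by omega
          have := h3 _ hm hgt
          simp only [List.mem_cons] at this
          rcases this with rfl | h
          · omega
          · have := List.rel_of_pairwise_cons h5 h
            omega

-- B's grouping pass over a strictly increasing nonempty list equals A's membership test plus walks
theorem pv_main (v : Int) (rest : List Int) (he : (v :: rest).Pairwise (· < ·)) (rank : Int) :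
    pvScan rank v v rest =
      if rank ∉ (v :: rest) then 0
      else pvWalkR (v :: rest) rank (v :: rest).length - pvWalkL (v :: rest) rank (v :: rest).length + 1 := by
  refine pv_scan_correct (v :: rest) rank rest v v le_rfl ?_ ?_ ?_ ?_ he.of_cons ?_
  · intro x hx1 hx2
    have : x = v := by omega
    simp [this]
  · intro hm
    simp only [List.mem_cons] at hm
    rcases hm with h | h
    · omega
    · have := List.rel_of_pairwise_cons he h
      omega
  · intro x hx hvx
    simp only [List.mem_cons] at hx
    rcases hx with rfl | h
    · omega
    · exact h
  · intro x hx
    exact ⟨List.rel_of_pairwise_cons he hx, List.mem_cons_of_mem _ hx⟩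
  · intro hm
    simp only [List.mem_cons] at hm
    rcases hm with rfl | h
    · exact le_rfl
    · exact le_of_lt (List.rel_of_pairwise_cons he h)

-- ===== VERDICT (by name: the statement is the Claim_ definition above) =====
theorem get_max_run_length_for_rank_spec : Claim_equal_get_max_run_length_for_rank := by
  intro hand_ranks rank _
  unfold Spec_get_max_run_length_for_rank
  simp only [get_max_run_length_for_rank, get_max_run_length_for_rank_alt]
  generalize hE : PySem.List.sorted (PySem.Set.ofList (List.filter (fun r => decide (r < 12)) hand_ranks)) (fun x => x) false = E
  have he : E.Pairwise (· < ·) := hE ▸ PySem.List.sorted_ofList_pairwise_lt _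
  cases E with
  | nil => simp
  | cons v rest => exact (pv_main v rest he rank).symm
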